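-- pv_equiv track=rewrite | github.com/AllUNeeedIsLove/PTHWG | PR2/PR2G.py | DaysSum
-- ===== SOURCE A (Python) =====
-- def DaysSum(Days):
--     temp = 0
--     for i in range(Days + 1):
--         if i<10:
--             temp = temp + i
--         else:
--             ff = str(i)
--             f = list(ff)
--             temp = temp + int(f[0]) + int(f[1])
--     return temp
-- ===== SOURCE B (Python) =====
-- def _first2sum(m):
--     # sum of the first two decimal digits of m (m >= 10), by arithmetic
--     while m >= 100:
--         m //= 10
--     return m // 10 + m % 10
--
-- def DaysSum(Days):
--     if Days < 0:
--         return 0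
--     if Days < 10:
--         return Days * (Days + 1) // 2
--     if Days < 100:
--         return 45 + sum(j // 10 + j % 10 for j in range(10, Days + 1))
--     q = Days // 10
--     # numbers 100..Days contribute f(i) = f(i//10); regroup by i//10:
--     # each j in 10..q-1 occurs 10 times, j = q occurs Days%10+1 times
--     return DaysSum(99) + 10 * (DaysSum(q - 1) - 45) + (Days % 10 + 1) * _first2sum(q)
-- ===== Notes on version B (the rewrite author's own statement) =====
-- stated objective: faster
-- what changed: B replaces A's per-day loop with string slicing by an O(log^2 Days) recursion: the first two digits of i equal those of i//10, so days 100..Days are regrouped into blocks of ten sharing one value, with Gauss/constant-size base cases below 100.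
import Mathlib
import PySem

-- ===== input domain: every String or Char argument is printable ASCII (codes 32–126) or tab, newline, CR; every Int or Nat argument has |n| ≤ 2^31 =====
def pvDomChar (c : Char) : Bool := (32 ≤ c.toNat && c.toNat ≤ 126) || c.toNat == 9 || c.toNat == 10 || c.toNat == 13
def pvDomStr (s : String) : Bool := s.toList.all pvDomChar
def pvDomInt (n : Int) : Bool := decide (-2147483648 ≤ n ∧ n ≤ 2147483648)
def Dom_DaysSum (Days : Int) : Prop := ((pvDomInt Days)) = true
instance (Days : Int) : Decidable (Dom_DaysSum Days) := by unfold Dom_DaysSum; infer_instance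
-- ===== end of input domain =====

-- B replaces A's per-day string slicing with an O(log^2 Days) recursion: the first two digits of i
-- equal those of i//10, so the range 100..Days is regrouped into blocks of ten sharing one value.

-- ===== PORT A =====
-- for i in range(Days+1): i<10 → temp+i, else temp + int(str(i)[0]) + int(str(i)[1]).
-- f = list(str(i)) is the char list PySem.Int.toChars i; int(f[0]) is ofChars? of that one char.
-- For every i ≥ 10 str(i) has ≥ 2 chars and both chars are digits, so the pyGetD/ofChars?
-- defaults ('0' / .getD 0) are unreachable: Python never raises here and A is total.
def DaysSum (Days : Int) : Int :=
  (PySem.List.pyRange 0 (Days + 1) 1).foldl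
    (fun temp i =>
      if i < 10 then temp + i
      else
        let f := PySem.Int.toChars i
        temp + (PySem.Int.ofChars? [PySem.List.pyGetD f 0 '0']).getD 0
             + (PySem.Int.ofChars? [PySem.List.pyGetD f 1 '0']).getD 0) 0

-- ===== PORT B =====
-- _first2sum: while m >= 100: m //= 10; return m//10 + m%10.  Fuel m.toNat only makes the
-- loop total (m drops by a factor 10 each step, so the fuel is never exhausted for m ≥ 1).
def pvFirst2Go : Nat → Int → Int
  | 0, _ => 0
  | fuel + 1, m =>
      if 100 ≤ m then pvFirst2Go fuel (PySem.Int.floordiv m 10)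
      else PySem.Int.floordiv m 10 + PySem.Int.mod m 10

def pvFirst2Sum (m : Int) : Int := pvFirst2Go m.toNat m

-- DaysSum of Source B: base cases 0..9 (Gauss) and 10..99 (small loop), and for Days ≥ 100 the
-- block recursion  DaysSum(99) + 10*(DaysSum(q-1) - 45) + (Days%10 + 1)*_first2sum(q),  q = Days//10.
-- Fuel Days.toNat + 1 only makes the recursion total (both recursive arguments are < Days).
def pvDaysGo : Nat → Int → Int
  | 0, _ => 0
  | fuel + 1, d =>
      if d < 0 then 0
      else if d < 10 then PySem.Int.floordiv (d * (d + 1)) 2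
      else if d < 100 then
        45 + ((PySem.List.pyRange 10 (d + 1) 1).map
          (fun j => PySem.Int.floordiv j 10 + PySem.Int.mod j 10)).sum
      else
        let q := PySem.Int.floordiv d 10
        pvDaysGo fuel 99 + 10 * (pvDaysGo fuel (q - 1) - 45)
          + (PySem.Int.mod d 10 + 1) * pvFirst2Sum q

def DaysSum_alt (Days : Int) : Int := pvDaysGo (Days.toNat + 1) Days

-- ===== PRECONDITION & SPEC =====
def Spec_DaysSum (Days : Int) (out : Int) : Prop := out = DaysSum_alt Days
instance (Days : Int) (out : Int) : Decidable (Spec_DaysSum Days out) := by unfold Spec_DaysSum; infer_instance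

-- ===== CLAIM (what is proved, stated in full; the proofs are below) =====
def Claim_equal_DaysSum : Prop := ∀ (Days : Int), Dom_DaysSum Days → Spec_DaysSum Days (DaysSum Days)

-- ===== LEMMAS AND PROOFS =====

-- the per-day value: i for i < 10, else the sum of the first two decimal digits of i
def pvFa (i : Nat) : Int := if i < 10 then (i : Int) else pvFirst2Sum (i : Int)

-- the mathematical total both ports compute
def pvG (n : Nat) : Int := ∑ i ∈ Finset.range (n + 1), pvFa i

-- sum of the two leading chars, as A parses them
def pvParse2 (cs : List Char) : Int :=
  (PySem.Int.ofChars? [PySem.List.pyGetD cs 0 '0']).getD 0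
  + (PySem.Int.ofChars? [PySem.List.pyGetD cs 1 '0']).getD 0

-- fuel invariance for the digit loop
lemma pvFirst2Go_congr : ∀ (f₁ : Nat), ∀ (f₂ : Nat) (m : Int), 10 ≤ m →
    m.toNat ≤ f₁ → m.toNat ≤ f₂ → pvFirst2Go f₁ m = pvFirst2Go f₂ m := by
  intro f₁
  induction f₁ with
  | zero => intro f₂ m hm h1 _; omega
  | succ g ih =>
    intro f₂ m hm h1 h2
    obtain ⟨h, rfl⟩ : ∃ h, f₂ = h + 1 := ⟨f₂ - 1, by omega⟩
    simp only [pvFirst2Go]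
    by_cases hc : 100 ≤ m
    · simp only [if_pos hc]
      have hdiv : PySem.Int.floordiv m 10 = m / 10 :=
        PySem.Int.floordiv_eq_ediv_of_pos (by norm_num)
      apply ih
      · rw [hdiv]; omega
      · rw [hdiv]; omega
      · rw [hdiv]; omega
    · simp only [if_neg hc]

lemma pvFirst2Sum_lt (m : Int) (h1 : 10 ≤ m) (h2 : m < 100) :
    pvFirst2Sum m = PySem.Int.floordiv m 10 + PySem.Int.mod m 10 := by
  unfold pvFirst2Sum
  obtain ⟨f, hf⟩ : ∃ f, m.toNat = f + 1 := ⟨m.toNat - 1, by omega⟩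
  rw [hf]
  simp only [pvFirst2Go, if_neg (by omega : ¬ (100 ≤ m))]

lemma pvFirst2Sum_ge (m : Int) (h : 100 ≤ m) :
    pvFirst2Sum m = pvFirst2Sum (PySem.Int.floordiv m 10) := by
  unfold pvFirst2Sum
  obtain ⟨f, hf⟩ : ∃ f, m.toNat = f + 1 := ⟨m.toNat - 1, by omega⟩
  rw [hf]
  simp only [pvFirst2Go, if_pos h]
  have hdiv : PySem.Int.floordiv m 10 = m / 10 :=
    PySem.Int.floordiv_eq_ediv_of_pos (by norm_num)
  exact pvFirst2Go_congr f ((PySem.Int.floordiv m 10).toNat) (PySem.Int.floordiv m 10)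
    (by rw [hdiv]; omega) (by rw [hdiv]; omega) (by rw [hdiv])

-- fuel invariance for the main recursion
lemma pvDaysGo_congr : ∀ (f₁ : Nat), ∀ (f₂ : Nat) (d : Int),
    d.toNat < f₁ → d.toNat < f₂ → pvDaysGo f₁ d = pvDaysGo f₂ d := by
  intro f₁
  induction f₁ with
  | zero => intro f₂ d h1 _; omega
  | succ g ih =>
    intro f₂ d h1 h2
    obtain ⟨h, rfl⟩ : ∃ h, f₂ = h + 1 := ⟨f₂ - 1, by omega⟩
    simp only [pvDaysGo]
    by_cases hneg : d < 0
    · simp only [if_pos hneg]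
    by_cases h10 : d < 10
    · simp only [if_neg hneg, if_pos h10]
    by_cases h100 : d < 100
    · simp only [if_neg hneg, if_neg h10, if_pos h100]
    · simp only [if_neg hneg, if_neg h10, if_neg h100]
      have hdiv : PySem.Int.floordiv d 10 = d / 10 :=
        PySem.Int.floordiv_eq_ediv_of_pos (by norm_num)
      have h99 : pvDaysGo g 99 = pvDaysGo h 99 := ih h 99 (by omega) (by omega)
      have hq : pvDaysGo g (PySem.Int.floordiv d 10 - 1) = pvDaysGo h (PySem.Int.floordiv d 10 - 1) := by
        apply ih
        · rw [hdiv]; omega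
        · rw [hdiv]; omega
      rw [h99, hq]

-- the three defining equations of DaysSum_alt
lemma pvAlt_neg (d : Int) (h : d < 0) : DaysSum_alt d = 0 := by
  unfold DaysSum_alt
  simp only [pvDaysGo, if_pos h]

lemma pvAlt_lt10 (d : Int) (h0 : ¬ d < 0) (h : d < 10) :
    DaysSum_alt d = PySem.Int.floordiv (d * (d + 1)) 2 := by
  unfold DaysSum_alt
  simp only [pvDaysGo, if_neg h0, if_pos h]

lemma pvAlt_lt100 (d : Int) (h0 : ¬ d < 0) (h10 : ¬ d < 10) (h : d < 100) :
    DaysSum_alt d = 45 + ((PySem.List.pyRange 10 (d + 1) 1).map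
      (fun j => PySem.Int.floordiv j 10 + PySem.Int.mod j 10)).sum := by
  unfold DaysSum_alt
  simp only [pvDaysGo, if_neg h0, if_neg h10, if_pos h]

lemma pvAlt_ge100 (d : Int) (h : 100 ≤ d) :
    DaysSum_alt d = DaysSum_alt 99 + 10 * (DaysSum_alt (PySem.Int.floordiv d 10 - 1) - 45)
      + (PySem.Int.mod d 10 + 1) * pvFirst2Sum (PySem.Int.floordiv d 10) := by
  conv_lhs => unfold DaysSum_alt
  simp only [pvDaysGo, if_neg (by omega : ¬ d < 0), if_neg (by omega : ¬ d < 10),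
    if_neg (by omega : ¬ d < 100)]
  have hdiv : PySem.Int.floordiv d 10 = d / 10 :=
    PySem.Int.floordiv_eq_ediv_of_pos (by norm_num)
  have h99 : pvDaysGo d.toNat 99 = DaysSum_alt 99 := by
    unfold DaysSum_alt
    apply pvDaysGo_congr
    · omega
    · omega
  have hq : pvDaysGo d.toNat (PySem.Int.floordiv d 10 - 1) = DaysSum_alt (PySem.Int.floordiv d 10 - 1) := by
    unfold DaysSum_alt
    apply pvDaysGo_congr
    · rw [hdiv]; omega
    · rw [hdiv]; omega
  rw [h99, hq]

-- str(k) = the base-10 digits of k, most significant first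
lemma pvToDigitsCore_eq : ∀ (f k : Nat) (l : List Char), 0 < k → k < 10 ^ f →
    Nat.toDigitsCore 10 f k l = ((Nat.digits 10 k).map Nat.digitChar).reverse ++ l := by
  intro f
  induction f with
  | zero => intro k l hk hf; simp at hf; omega
  | succ g ih =>
    intro k l hk hf
    rw [Nat.toDigitsCore]
    by_cases hq : k / 10 = 0
    · have hk10 : k < 10 := by omega
      simp only [hq]
      rw [Nat.digits_def' (by norm_num : (1:Nat) < 10) hk, hq, Nat.digits_zero,
        Nat.mod_eq_of_lt hk10]
      simp
    · simp only [if_neg hq]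
      rw [ih (k / 10) _ (by omega) (by
        have : 10 ^ (g + 1) = 10 ^ g * 10 := by ring
        omega)]
      rw [Nat.digits_def' (by norm_num : (1:Nat) < 10) hk]
      simp

lemma pvToChars_eq (k : Nat) (hk : 0 < k) :
    PySem.Int.toChars (k : Int) = ((Nat.digits 10 k).map Nat.digitChar).reverse := by
  have h1 : ¬ ((k : Int) < 0) := by omega
  simp only [PySem.Int.toChars, if_neg h1, Int.toNat_natCast, Nat.toDigits]
  rw [pvToDigitsCore_eq (k + 1) k [] hk (by
    calc k < 10 ^ k := Nat.lt_pow_self (by norm_num)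
    _ ≤ 10 ^ (k + 1) := Nat.pow_le_pow_right (by norm_num) (by omega))]
  simp

-- parsing one digit char gives back the digit
lemma pvParseDigit (d : Nat) (hd : d < 10) :
    (PySem.Int.ofChars? [Nat.digitChar d]).getD 0 = (d : Int) := by
  interval_cases d <;> decide

-- first two chars of an appended-last list, when the prefix has ≥ 2 chars
lemma pvParse2_append (l : List Char) (c : Char) (hl : 2 ≤ l.length) :
    pvParse2 (l ++ [c]) = pvParse2 l := by
  unfold pvParse2
  rw [PySem.List.pyGetD_eq_getElem (l ++ [c]) '0' (by norm_num) (by rw [List.length_append]; push_cast; omega),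
      PySem.List.pyGetD_eq_getElem (l ++ [c]) '0' (by norm_num) (by rw [List.length_append]; push_cast; omega),
      PySem.List.pyGetD_eq_getElem l '0' (by norm_num) (by exact_mod_cast by omega),
      PySem.List.pyGetD_eq_getElem l '0' (by norm_num) (by exact_mod_cast by omega)]
  rw [List.getElem_append_left (by omega), List.getElem_append_left (by omega)]

-- the heart: parsing the two leading digit chars equals the arithmetic first-two-digit sum
lemma pvParse2_digits : ∀ (k : Nat), 10 ≤ k →
    pvParse2 (((Nat.digits 10 k).map Nat.digitChar).reverse) = pvFirst2Sum (k : Int) := by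
  intro k
  induction k using Nat.strong_induction_on with
  | _ k ih =>
    intro hk
    by_cases h100 : k < 100
    · -- two-digit k: digits 10 k = [k % 10, k / 10]
      have hd1 : Nat.digits 10 k = k % 10 :: Nat.digits 10 (k / 10) :=
        Nat.digits_def' (by norm_num) (by omega)
      have hd2 : Nat.digits 10 (k / 10) = (k / 10) % 10 :: Nat.digits 10 (k / 10 / 10) :=
        Nat.digits_def' (by norm_num) (by omega)
      have hz : k / 10 / 10 = 0 := by omega
      have hmod : (k / 10) % 10 = k / 10 := by omega
      rw [hd1, hd2, hz, hmod, Nat.digits_zero]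
      unfold pvParse2
      simp only [List.map_cons, List.map_nil, List.reverse_cons, List.reverse_nil,
        List.nil_append, List.cons_append]
      rw [show PySem.List.pyGetD [Nat.digitChar (k / 10), Nat.digitChar (k % 10)] 0 '0'
            = Nat.digitChar (k / 10) from rfl,
          show PySem.List.pyGetD [Nat.digitChar (k / 10), Nat.digitChar (k % 10)] 1 '0'
            = Nat.digitChar (k % 10) from rfl]
      rw [pvParseDigit (k / 10) (by omega), pvParseDigit (k % 10) (by omega)]
      rw [pvFirst2Sum_lt (k : Int) (by omega) (by omega)]
      rw [show ((10 : Int)) = ((10 : Nat) : Int) from rfl, PySem.Int.floordiv_natCast,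
        PySem.Int.mod_natCast]
    · -- k ≥ 100: drop the last digit
      have hd1 : Nat.digits 10 k = k % 10 :: Nat.digits 10 (k / 10) :=
        Nat.digits_def' (by norm_num) (by omega)
      have hlen : 2 ≤ (Nat.digits 10 (k / 10)).length := by
        by_contra hcon
        have : (Nat.digits 10 (k / 10)).length ≤ 1 := by omega
        have := (Nat.digits_length_le_iff (by norm_num : (1:Nat) < 10) (k / 10)).mp this
        simp at this; omega
      rw [hd1]
      simp only [List.map_cons, List.reverse_cons]
      rw [pvParse2_append _ _ (by simpa using hlen)]
      rw [ih (k / 10) (by omega) (by omega)]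
      rw [pvFirst2Sum_ge (k : Int) (by omega)]
      rw [show ((10 : Int)) = ((10 : Nat) : Int) from rfl, PySem.Int.floordiv_natCast]

-- A's per-day else-branch equals pvFirst2Sum
lemma pvStringBranch (i : Nat) (hi : 10 ≤ i) :
    (PySem.Int.ofChars? [PySem.List.pyGetD (PySem.Int.toChars (i : Int)) 0 '0']).getD 0
    + (PySem.Int.ofChars? [PySem.List.pyGetD (PySem.Int.toChars (i : Int)) 1 '0']).getD 0
    = pvFirst2Sum (i : Int) := by
  rw [pvToChars_eq i (by omega)]
  exact pvParse2_digits i hi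

-- a mapped pyRange sum as a Finset sum
lemma pvRangeSum (a b : Nat) (h : Int → Int) :
    ((PySem.List.pyRange (a : Int) (b : Int) 1).map h).sum = ∑ i ∈ Finset.Ico a b, h (i : Int) := by
  rw [PySem.List.pyRange_one]
  rw [List.map_map]
  have hcast : ((b : Int) - (a : Int)).toNat = b - a := by omega
  rw [hcast]
  rw [Finset.sum_Ico_eq_sum_range]
  induction (b - a) with
  | zero => simp
  | succ n ihn =>
    rw [List.range_succ, List.map_append, List.sum_append, Finset.sum_range_succ, ihn]
    simp [Function.comp]

-- A's fold equals the mathematical total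
lemma pvA_eq (n : Nat) : DaysSum (n : Int) = pvG n := by
  unfold DaysSum
  have hstep : (fun (temp i : Int) =>
      if i < 10 then temp + i
      else
        let f := PySem.Int.toChars i
        temp + (PySem.Int.ofChars? [PySem.List.pyGetD f 0 '0']).getD 0
             + (PySem.Int.ofChars? [PySem.List.pyGetD f 1 '0']).getD 0)
      = fun (temp i : Int) => temp +
        (if i < 10 then i
         else (PySem.Int.ofChars? [PySem.List.pyGetD (PySem.Int.toChars i) 0 '0']).getD 0
            + (PySem.Int.ofChars? [PySem.List.pyGetD (PySem.Int.toChars i) 1 '0']).getD 0) := by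
    funext temp i
    split_ifs <;> ring
  rw [hstep, PySem.List.foldl_add, zero_add]
  have h0 : (0 : Int) = ((0 : Nat) : Int) := rfl
  have h1 : (n : Int) + 1 = ((n + 1 : Nat) : Int) := by push_cast; ring
  rw [h0, h1, pvRangeSum 0 (n + 1)]
  unfold pvG
  rw [Finset.range_eq_Ico]
  apply Finset.sum_congr rfl
  intro i _
  unfold pvFa
  by_cases hi : i < 10
  · rw [if_pos (by exact_mod_cast hi), if_pos hi]
  · rw [if_neg (by exact_mod_cast hi), if_neg hi]
    exact pvStringBranch i (by omega)

-- regrouping the range 100..n by tens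
lemma pvRegroup (g : Nat → Int) (n : Nat) (hn : 100 ≤ n) :
    ∑ i ∈ Finset.Ico 100 (n + 1), g (i / 10)
    = 10 * ∑ j ∈ Finset.Ico 10 (n / 10), g j + ((n % 10 : Nat) + 1) * g (n / 10) := by
  induction n, hn using Nat.le_induction with
  | base =>
    rw [Finset.sum_Ico_succ_top (by norm_num)]
    norm_num
  | succ n hn ihn =>
    rw [Finset.sum_Ico_succ_top (by omega), ihn]
    by_cases h9 : n % 10 = 9
    · have e1 : (n + 1) / 10 = n / 10 + 1 := by omega
      have e2 : (n + 1) % 10 = 0 := by omega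
      rw [e1, e2]
      rw [Finset.sum_Ico_succ_top (by omega : 10 ≤ n / 10)]
      rw [h9]
      push_cast
      ring
    · have e1 : (n + 1) / 10 = n / 10 := by omega
      have e2 : (n + 1) % 10 = n % 10 + 1 := by omega
      rw [e1, e2]
      push_cast
      ring

-- splitting the total at a
lemma pvG_split (a n : Nat) (h : a ≤ n) :
    pvG n = pvG a + ∑ i ∈ Finset.Ico (a + 1) (n + 1), pvFa i := by
  unfold pvG
  rw [Finset.range_eq_Ico,
    ← Finset.sum_Ico_consecutive pvFa (by omega : 0 ≤ a + 1) (by omega : a + 1 ≤ n + 1)]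

lemma pvG9 : pvG 9 = 45 := by decide

lemma pvG_tail (m : Nat) (h : 9 ≤ m) :
    ∑ j ∈ Finset.Ico 10 (m + 1), pvFa j = pvG m - 45 := by
  rw [pvG_split 9 m h, pvG9]
  ring

-- B equals the mathematical total
lemma pvB_eq (n : Nat) : DaysSum_alt (n : Int) = pvG n := by
  induction n using Nat.strong_induction_on with
  | _ n ih =>
    by_cases h10 : n < 10
    · rw [pvAlt_lt10 (n : Int) (by omega) (by omega)]
      unfold pvG pvFa
      interval_cases n <;> decide
    by_cases h100 : n < 100
    · rw [pvAlt_lt100 (n : Int) (by omega) (by omega) (by exact_mod_cast h100)]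
      have h1 : ((10 : Int)) = ((10 : Nat) : Int) := rfl
      have h2 : (n : Int) + 1 = ((n + 1 : Nat) : Int) := by push_cast; ring
      rw [h1, h2, pvRangeSum 10 (n + 1)]
      rw [pvG_split 9 n (by omega), pvG9]
      congr 1
      apply Finset.sum_congr rfl
      intro j hj
      simp only [Finset.mem_Ico] at hj
      unfold pvFa
      rw [if_neg (by omega)]
      rw [pvFirst2Sum_lt (j : Int) (by omega) (by omega)]
      rw [show ((10 : Int)) = ((10 : Nat) : Int) from rfl, PySem.Int.floordiv_natCast,
        PySem.Int.mod_natCast]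
    · -- n ≥ 100
      have hge : 100 ≤ (n : Int) := by omega
      rw [pvAlt_ge100 (n : Int) hge]
      have hdivc : PySem.Int.floordiv (n : Int) 10 = ((n / 10 : Nat) : Int) := by
        rw [show ((10 : Int)) = ((10 : Nat) : Int) from rfl, PySem.Int.floordiv_natCast]
      have hmodc : PySem.Int.mod (n : Int) 10 = ((n % 10 : Nat) : Int) := by
        rw [show ((10 : Int)) = ((10 : Nat) : Int) from rfl, PySem.Int.mod_natCast]
      have hq1 : ((n / 10 : Nat) : Int) - 1 = ((n / 10 - 1 : Nat) : Int) := by omega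
      rw [hdivc, hmodc, hq1]
      rw [show ((99 : Int)) = ((99 : Nat) : Int) from rfl]
      rw [ih 99 (by omega), ih (n / 10 - 1) (by omega)]
      -- split the total at 100 and regroup the tail by tens
      rw [pvG_split 99 n (by omega)]
      have htail : ∑ i ∈ Finset.Ico 100 (n + 1), pvFa i
          = ∑ i ∈ Finset.Ico 100 (n + 1), pvFa (i / 10) := by
        apply Finset.sum_congr rfl
        intro i hi
        simp only [Finset.mem_Ico] at hi
        unfold pvFa
        rw [if_neg (by omega), if_neg (by omega)]
        rw [pvFirst2Sum_ge (i : Int) (by omega)]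
        rw [show ((10 : Int)) = ((10 : Nat) : Int) from rfl, PySem.Int.floordiv_natCast]
      rw [htail, pvRegroup pvFa n (by omega)]
      have hGq : ∑ j ∈ Finset.Ico 10 (n / 10), pvFa j = pvG (n / 10 - 1) - 45 := by
        have := pvG_tail (n / 10 - 1) (by omega)
        rwa [show n / 10 - 1 + 1 = n / 10 by omega] at this
      have hfq : pvFirst2Sum ((n / 10 : Nat) : Int) = pvFa (n / 10) := by
        unfold pvFa; rw [if_neg (by omega)]
      rw [hGq, hfq]
      ring

-- ===== VERDICT (by name: the statement is the Claim_ definition above) =====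
theorem DaysSum_spec : Claim_equal_DaysSum := by
  intro Days _
  unfold Spec_DaysSum
  by_cases hneg : Days < 0
  · rw [pvAlt_neg Days hneg]
    unfold DaysSum
    rw [PySem.List.pyRange_one_eq_nil (by omega)]
    rfl
  · have h : Days = ((Days.toNat : Nat) : Int) := by omega
    rw [h, pvA_eq, pvB_eq]
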